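-- pv_equiv track=rewrite | github.com/sharkblue-LS/PythonProjects | venv/Lib/site-packages/eric6/WebBrowser/AdBlock/AdBlockRule.py | __filterIsOnlyEndsMatch
-- ===== SOURCE A (Python) =====
-- def __filterIsOnlyEndsMatch(filterString):
--     """
--     Private method to check, if the given filter is to match against the
--     end of a string.
--
--     @param filterString filter string to be checked
--     @type str
--     @return flag indicating a end of string match filter
--     @rtype bool
--     """
--     index = 0
--     for filterChar in filterString:
--         if filterChar in ["^", "*"]:
--             return False
--         elif filterChar == "|":
--             return bool(index == len(filterString) - 1)
--         index += 1
--
--     return False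
-- ===== SOURCE B (Python) =====
-- def __filterIsOnlyEndsMatch(filterString):
--     # Position-arithmetic formulation: no other special char may occur at all,
--     # and the FIRST '|' must sit exactly at the last index.
--     if "^" in filterString or "*" in filterString:
--         return False
--     return filterString != "" and filterString.find("|") == len(filterString) - 1
-- ===== Notes on version B (the rewrite author's own statement) =====
-- stated objective: faster
-- what changed: Replaces A's indexed per-character Python loop with position arithmetic on C-implemented string primitives: reject if '^' or '*' occurs anywhere (substring membership), then accept iff str.find('|') equals the last index of a non-empty string.
import Mathlib
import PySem

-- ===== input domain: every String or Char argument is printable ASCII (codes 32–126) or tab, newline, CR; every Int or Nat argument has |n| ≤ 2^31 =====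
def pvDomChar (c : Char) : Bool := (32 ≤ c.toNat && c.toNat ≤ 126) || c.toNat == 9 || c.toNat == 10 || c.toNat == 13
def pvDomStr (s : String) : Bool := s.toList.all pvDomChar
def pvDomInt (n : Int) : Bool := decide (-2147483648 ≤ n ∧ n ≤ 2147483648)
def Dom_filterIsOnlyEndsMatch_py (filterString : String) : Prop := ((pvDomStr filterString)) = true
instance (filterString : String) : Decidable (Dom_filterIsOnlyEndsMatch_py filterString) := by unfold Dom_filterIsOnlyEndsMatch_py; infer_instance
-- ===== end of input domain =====

-- B drops A's indexed early-return scan for position arithmetic on library primitives: membership tests for '^'/'*' and first-occurrence-of-'|' index = last index (objective: alternative).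


-- ===== PORT A =====
-- A's loop: walk the characters with an index; first '^'/'*' returns False,
-- first '|' returns (index == len - 1), falling off the end returns False.
def pvALoop : List Char → Nat → Nat → Bool
  | [], _, _ => false
  | c :: rest, i, n =>
    if c = '^' ∨ c = '*' then false
    else if c = '|' then decide (i = n - 1)
    else pvALoop rest (i + 1) n

def filterIsOnlyEndsMatch_py (filterString : String) : Bool :=
  pvALoop filterString.toList 0 filterString.toList.length

-- ===== PORT B =====
def filterIsOnlyEndsMatch_py_alt (filterString : String) : Bool :=
  if PySem.Str.isIn "^" filterString || PySem.Str.isIn "*" filterString then false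
  else decide (filterString ≠ "") &&
       decide (PySem.Str.find filterString "|" = (PySem.Str.len filterString : Int) - 1)

-- ===== PRECONDITION & SPEC =====
def Spec_filterIsOnlyEndsMatch_py (filterString : String) (out : Bool) : Prop := out = filterIsOnlyEndsMatch_py_alt filterString
instance (filterString : String) (out : Bool) : Decidable (Spec_filterIsOnlyEndsMatch_py filterString out) := by unfold Spec_filterIsOnlyEndsMatch_py; infer_instance

-- ===== CLAIM (what is proved, stated in full; the proofs are below) =====
def Claim_equal_filterIsOnlyEndsMatch_py : Prop := ∀ (filterString : String), Dom_filterIsOnlyEndsMatch_py filterString → Spec_filterIsOnlyEndsMatch_py filterString (filterIsOnlyEndsMatch_py filterString)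

-- ===== LEMMAS AND PROOFS =====

-- Common characterisation both ports are reduced to: non-empty, last char '|',
-- and no special character before it.
def pvGood (l : List Char) : Bool :=
  if !(l.getLast? == some '|') then false
  else !(l.dropLast.any (fun c => c = '^' || c = '*' || c = '|'))

lemma pvALoop_eq (l : List Char) : ∀ i : Nat, pvALoop l i (i + l.length) = pvGood l := by
  induction l with
  | nil => intro i; simp [pvALoop, pvGood]
  | cons c rest ih =>
    intro i
    simp only [pvALoop, pvGood]
    by_cases h1 : c = '^' ∨ c = '*'
    · rw [if_pos h1]
      cases rest with
      | nil => rcases h1 with h | h <;> subst h <;> decide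
      | cons d t =>
        by_cases h2 : (d :: t).getLast? = some '|'
        · rw [List.getLast?_cons_cons, h2]
          have hd : (c :: d :: t).dropLast = c :: (d :: t).dropLast := by
            simp [List.dropLast_cons_of_ne_nil]
          rw [hd]
          simp only [List.any_cons]
          rcases h1 with h | h <;> subst h <;> simp
        · rw [List.getLast?_cons_cons, if_pos (by simp [h2])]
    · rw [if_neg h1]
      rw [not_or] at h1
      by_cases h2 : c = '|'
      · rw [if_pos h2]
        subst h2
        cases rest with
        | nil => simp
        | cons d t =>
          have hlen : ¬ (i = i + ((d :: t).length + 1) - 1) := by simp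
          rw [List.length_cons, decide_eq_false hlen]
          by_cases h3 : (d :: t).getLast? = some '|'
          · rw [List.getLast?_cons_cons, h3]
            have hd : ('|' :: d :: t).dropLast = '|' :: (d :: t).dropLast := by
              simp [List.dropLast_cons_of_ne_nil]
            rw [hd]; simp
          · rw [List.getLast?_cons_cons, if_pos (by simp [h3])]
      · rw [if_neg h2]
        cases rest with
        | nil => simp [pvALoop, List.getLast?, h2]
        | cons d t =>
          have hA : i + (c :: d :: t).length = (i + 1) + (d :: t).length := by
            simp [List.length_cons]; omega
          rw [hA, ih (i + 1)]
          simp only [pvGood, List.getLast?_cons_cons]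
          by_cases h3 : (d :: t).getLast? = some '|'
          · rw [h3]
            have hd : (c :: d :: t).dropLast = c :: (d :: t).dropLast := by
              simp [List.dropLast_cons_of_ne_nil]
            rw [hd]
            simp [h1.1, h1.2, h2]
          · rw [if_pos (by simp [h3]), if_pos (by simp [h3])]

lemma singleton_infix_iff (l : List Char) (c : Char) : [c] <:+: l ↔ c ∈ l := by
  constructor
  · rintro ⟨s, t, rfl⟩; simp
  · intro h
    obtain ⟨s, t, rfl⟩ := List.append_of_mem h
    exact ⟨s, t, by simp⟩

lemma singleton_prefix_drop (l : List Char) (c : Char) (i : Nat) :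
    [c] <+: l.drop i ↔ l[i]? = some c := by
  rw [← List.head?_drop]
  cases h : l.drop i with
  | nil => simp [List.prefix_iff_eq_take]
  | cons d t =>
    constructor
    · rintro ⟨u, hu⟩
      simp only [List.singleton_append] at hu
      rw [← hu]; rfl
    · intro hh
      simp only [List.head?_cons, Option.some.injEq] at hh
      exact ⟨t, by rw [hh]; rfl⟩

lemma mem_dropLast_iff (l : List Char) (c : Char) :
    c ∈ l.dropLast ↔ ∃ i : Nat, i < l.length - 1 ∧ l[i]? = some c := by
  rw [List.mem_iff_getElem?]
  constructor
  · rintro ⟨i, hi⟩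
    have hlt : i < l.dropLast.length := by
      by_contra hge
      rw [List.getElem?_eq_none (by omega)] at hi
      simp at hi
    rw [List.length_dropLast] at hlt
    refine ⟨i, hlt, ?_⟩
    rwa [List.getElem?_dropLast, if_pos hlt] at hi
  · rintro ⟨i, hlt, hi⟩
    exact ⟨i, by rwa [List.getElem?_dropLast, if_pos hlt]⟩

-- find('|') lands exactly on the last index iff the last char is '|' and no earlier one is.
lemma find_bar_iff (l : List Char) (hne : l ≠ []) :
    PySem.Chars.find l ['|'] = (l.length : Int) - 1 ↔
      (l.getLast? = some '|' ∧ '|' ∉ l.dropLast) := by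
  have hlen : 1 ≤ l.length := List.length_pos_iff.mpr hne
  constructor
  · intro h
    have hnn : 0 ≤ PySem.Chars.find l ['|'] := by omega
    obtain ⟨h1, h2⟩ := PySem.Chars.find_spec (s := l) (sub := ['|']) hnn
    have htn : (PySem.Chars.find l ['|']).toNat = l.length - 1 := by omega
    rw [htn] at h1 h2
    constructor
    · rw [List.getLast?_eq_getElem?]
      exact (singleton_prefix_drop l '|' (l.length - 1)).mp h1
    · rw [mem_dropLast_iff]
      rintro ⟨i, hlt, hi⟩
      exact h2 i hlt ((singleton_prefix_drop l '|' i).mpr hi)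
  · rintro ⟨h1, h2⟩
    have hmem : '|' ∈ l := by
      rw [List.getLast?_eq_getElem?] at h1
      exact List.mem_iff_getElem?.mpr ⟨l.length - 1, h1⟩
    have hnn : 0 ≤ PySem.Chars.find l ['|'] := by
      rw [PySem.Chars.find_nonneg_iff, singleton_infix_iff]; exact hmem
    obtain ⟨hp, hmin⟩ := PySem.Chars.find_spec (s := l) (sub := ['|']) hnn
    have hgk : l[(PySem.Chars.find l ['|']).toNat]? = some '|' :=
      (singleton_prefix_drop l '|' _).mp hp
    have hub : (PySem.Chars.find l ['|']).toNat < l.length := by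
      by_contra hge
      rw [List.getElem?_eq_none (by omega)] at hgk
      simp at hgk
    have hnotlt : ¬ (PySem.Chars.find l ['|']).toNat < l.length - 1 := by
      intro hlt
      exact h2 ((mem_dropLast_iff l '|').mpr ⟨_, hlt, hgk⟩)
    omega

lemma pvAlt_eq_pvGood (l : List Char) :
    (if PySem.Chars.isIn ['^'] l || PySem.Chars.isIn ['*'] l then false
     else decide (l ≠ []) &&
          decide (PySem.Chars.find l ['|'] = (l.length : Int) - 1)) = pvGood l := by
  by_cases hm : '^' ∈ l ∨ '*' ∈ l
  · rw [if_pos]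
    · unfold pvGood
      by_cases h1 : l.getLast? = some '|'
      · rw [h1, if_neg (by simp)]
        have hne : l ≠ [] := by rintro rfl; simp at h1
        have hX : (l.dropLast.any (fun c => c = '^' || c = '*' || c = '|')) = true := by
          rw [List.any_eq_true]
          rcases hm with hc | hc
          all_goals {
            obtain ⟨i, hi⟩ := List.mem_iff_getElem?.mp hc
            have hub : i < l.length := by
              by_contra hge
              rw [List.getElem?_eq_none (by omega)] at hi
              simp at hi
            have hlt : i < l.length - 1 := by
              rcases Nat.lt_or_ge i (l.length - 1) with h | h
              · exact h
              · exfalso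
                have hEq : i = l.length - 1 := by omega
                subst hEq
                rw [List.getLast?_eq_getElem?, hi] at h1
                simp at h1
            exact ⟨_, (mem_dropLast_iff l _).mpr ⟨i, hlt, hi⟩, by simp⟩
          }
        rw [hX]
        rfl
      · rw [if_pos (by simp [h1])]
    · rcases hm with hc | hc
      · have : PySem.Chars.isIn ['^'] l = true := by
          rw [PySem.Chars.isIn_iff_infix, singleton_infix_iff]; exact hc
        simp [this]
      · have : PySem.Chars.isIn ['*'] l = true := by
          rw [PySem.Chars.isIn_iff_infix, singleton_infix_iff]; exact hc
        simp [this]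
  · rw [not_or] at hm
    rw [if_neg]
    · by_cases hne : l = []
      · subst hne; simp [pvGood]
      · rw [decide_eq_true hne, Bool.true_and]
        unfold pvGood
        by_cases h1 : l.getLast? = some '|'
        · rw [h1, if_neg (by simp)]
          have hbar : '|' ∉ l.dropLast ↔
              (l.dropLast.any (fun c => c = '^' || c = '*' || c = '|')) = false := by
            simp only [List.any_eq_false]
            constructor
            · intro hn c hc
              have h2 : c ≠ '^' := fun h => hm.1 (h ▸ List.dropLast_subset l hc)
              have h3 : c ≠ '*' := fun h => hm.2 (h ▸ List.dropLast_subset l hc)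
              have h4 : c ≠ '|' := fun h => hn (h ▸ hc)
              simp [h2, h3, h4]
            · intro hall hc
              have := hall _ hc
              simp at this
          rcases Bool.eq_false_or_eq_true
              (l.dropLast.any (fun c => c = '^' || c = '*' || c = '|')) with ht | hf
          · rw [ht, Bool.not_true, decide_eq_false_iff_not]
            rw [find_bar_iff l hne]
            rintro ⟨-, hnb⟩
            rw [hbar] at hnb
            rw [hnb] at ht
            exact Bool.noConfusion ht
          · rw [hf, Bool.not_false, decide_eq_true_eq, find_bar_iff l hne]
            exact ⟨h1, hbar.mpr hf⟩
        · rw [if_pos (by simp [h1]), decide_eq_false]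
          rw [find_bar_iff l hne]
          rintro ⟨hc, -⟩
          exact h1 hc
    · intro hcon
      rcases Bool.or_eq_true_iff.mp hcon with hc | hc
      all_goals rw [PySem.Chars.isIn_iff_infix, singleton_infix_iff] at hc
      · exact hm.1 hc
      · exact hm.2 hc

-- ===== VERDICT (by name: the statement is the Claim_ definition above) =====
theorem filterIsOnlyEndsMatch_py_spec : Claim_equal_filterIsOnlyEndsMatch_py := by
  intro s _
  unfold Spec_filterIsOnlyEndsMatch_py filterIsOnlyEndsMatch_py filterIsOnlyEndsMatch_py_alt
  have hne : s ≠ "" ↔ s.toList ≠ [] := by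
    constructor
    · intro h hc; exact h (by rwa [← String.toList_eq_nil_iff])
    · intro h hc; exact h (by simp [hc])
  have hd : decide (s ≠ "") = decide (s.toList ≠ []) := by
    by_cases h : s = ""
    · subst h; rfl
    · simp [h, hne.mp h]
  have t1 : ("^" : String).toList = ['^'] := rfl
  have t2 : ("*" : String).toList = ['*'] := rfl
  have t3 : ("|" : String).toList = ['|'] := rfl
  rw [PySem.Str.isIn_eq, PySem.Str.isIn_eq, PySem.Str.find_eq, PySem.Str.len_eq,
      t1, t2, t3, hd, pvAlt_eq_pvGood]
  have hA := pvALoop_eq s.toList 0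
  simpa using hA
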